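-- pv_equiv track=rewrite | github.com/DomMorello/Dom-s-algorithm | src/baekjoonAlgorithm/password_4659.py | two_in_a_row
-- ===== SOURCE A (Python) =====
-- def two_in_a_row(pw, ls):
--     cnt = 0
--     i = 1
--     while i < len(pw):
--         if pw[i] != 'e' and pw[i] != 'o':
--             if pw[i] == pw[i - 1]:
--                 cnt += 1
--             else:
--                 cnt = 0
--         if cnt >= 1:
--             return False
--         i += 1
--     return True
-- ===== SOURCE B (Python) =====
-- from itertools import groupby
--
-- def two_in_a_row(pw, ls):
--     for ch, grp in groupby(pw):
--         if ch != 'e' and ch != 'o' and sum(1 for _ in grp) >= 2: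
--             return False
--     return True
-- ===== Notes on version B (the rewrite author's own statement) =====
-- stated objective: idiomatic
-- what changed: Replaced the index/counter while-loop over adjacent positions with an itertools.groupby pass over maximal equal-character runs, rejecting any non-'e'/'o' run of length >= 2.
import Mathlib
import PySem

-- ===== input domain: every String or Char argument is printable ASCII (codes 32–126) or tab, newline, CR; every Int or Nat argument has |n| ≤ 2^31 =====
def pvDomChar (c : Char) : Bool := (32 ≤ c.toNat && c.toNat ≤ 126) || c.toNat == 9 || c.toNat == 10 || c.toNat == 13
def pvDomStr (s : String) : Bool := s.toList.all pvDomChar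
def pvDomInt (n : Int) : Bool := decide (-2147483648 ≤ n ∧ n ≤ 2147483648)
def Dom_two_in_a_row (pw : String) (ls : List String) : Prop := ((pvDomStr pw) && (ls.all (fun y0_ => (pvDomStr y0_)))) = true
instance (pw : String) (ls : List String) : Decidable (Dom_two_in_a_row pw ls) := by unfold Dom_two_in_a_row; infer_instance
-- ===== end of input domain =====

-- B replaces A's index/counter while-loop over adjacent positions with a pass over maximal
-- equal-character runs (itertools.groupby): more idiomatic, same O(n) cost.

-- ===== PORT A =====
-- A's while-loop: i runs from 1, prev = pw[i-1], cnt is the counter variable.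
def twoInARowLoopA (prev : Char) (cnt : Int) : List Char → Bool
  | [] => true
  | c :: rest =>
    let cnt' := if c ≠ 'e' ∧ c ≠ 'o' then (if c = prev then cnt + 1 else 0) else cnt
    if 1 ≤ cnt' then false else twoInARowLoopA c cnt' rest

def two_in_a_row (pw : String) (_ls : List String) : Bool :=
  match pw.toList with
  | [] => true
  | c :: rest => twoInARowLoopA c 0 rest

-- ===== PORT B =====
-- groupby pw: split into maximal runs of equal characters (run char, run length), left to right.
def twoInARowRuns : List Char → List (Char × Nat)
  | [] => []
  | c :: rest =>
    match twoInARowRuns rest with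
    | [] => [(c, 1)]
    | (d, n) :: t => if c = d then (c, n + 1) :: t else (c, 1) :: (d, n) :: t

def two_in_a_row_alt (pw : String) (_ls : List String) : Bool :=
  !(twoInARowRuns pw.toList).any (fun p => p.1 ≠ 'e' && p.1 ≠ 'o' && 2 ≤ p.2)

-- ===== PRECONDITION & SPEC =====
def Spec_two_in_a_row (pw : String) (ls : List String) (out : Bool) : Prop := out = two_in_a_row_alt pw ls
instance (pw : String) (ls : List String) (out : Bool) : Decidable (Spec_two_in_a_row pw ls out) := by unfold Spec_two_in_a_row; infer_instance

-- ===== CLAIM (what is proved, stated in full; the proofs are below) =====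
def Claim_equal_two_in_a_row : Prop := ∀ (pw : String) (ls : List String), Dom_two_in_a_row pw ls → Spec_two_in_a_row pw ls (two_in_a_row pw ls)

-- ===== LEMMAS AND PROOFS =====

-- "some adjacent pair pw[i-1] = pw[i] with pw[i] ∉ {e,o}" — the common characterisation
def twoInARowAdjBad : List Char → Bool
  | a :: b :: t => ((b ≠ 'e' ∧ b ≠ 'o' : Bool) && (b = a : Bool)) || twoInARowAdjBad (b :: t)
  | _ => false

def twoInARowBadRun (p : Char × Nat) : Bool := p.1 ≠ 'e' && p.1 ≠ 'o' && 2 ≤ p.2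

theorem loopA_eq_adjBad : ∀ (rest : List Char) (prev : Char),
    twoInARowLoopA prev 0 rest = !twoInARowAdjBad (prev :: rest) := by
  intro rest
  induction rest with
  | nil => intro prev; simp [twoInARowLoopA, twoInARowAdjBad]
  | cons c t ih =>
    intro prev
    by_cases he : c = prev
    · subst he
      by_cases hb : c ≠ 'e' ∧ c ≠ 'o'
      · simp [twoInARowLoopA, twoInARowAdjBad, hb]
      · have hco : c = 'e' ∨ c = 'o' := by tauto
        rcases hco with h | h <;> subst h <;>
          simp [twoInARowLoopA, twoInARowAdjBad, ih]
    · by_cases hb : c ≠ 'e' ∧ c ≠ 'o'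
      · have hcp : decide (c = prev) = false := by simpa using he
        simp [twoInARowLoopA, twoInARowAdjBad, hb, he, ih c]
      · have hco : c = 'e' ∨ c = 'o' := by tauto
        rcases hco with h | h <;> subst h <;>
          simp [twoInARowLoopA, twoInARowAdjBad, ih, he]

theorem runs_head : ∀ (t : List Char) (d : Char),
    ∃ n rs, twoInARowRuns (d :: t) = (d, n) :: rs ∧ 1 ≤ n := by
  intro t d
  cases h : twoInARowRuns t with
  | nil => exact ⟨1, [], by simp [twoInARowRuns, h], le_refl 1⟩
  | cons p rs =>
    obtain ⟨e, m⟩ := p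
    by_cases hde : d = e
    · refine ⟨m + 1, rs, ?_, by omega⟩
      show (match twoInARowRuns t with
        | [] => [(d, 1)]
        | (e, m) :: rs => if d = e then (d, m + 1) :: rs else (d, 1) :: (e, m) :: rs) = _
      rw [h]; simp [hde]
    · refine ⟨1, (e, m) :: rs, ?_, le_refl 1⟩
      show (match twoInARowRuns t with
        | [] => [(d, 1)]
        | (e, m) :: rs => if d = e then (d, m + 1) :: rs else (d, 1) :: (e, m) :: rs) = _
      rw [h]; simp [hde]

theorem runs_eq_adjBad : ∀ (cs : List Char),
    (twoInARowRuns cs).any twoInARowBadRun = twoInARowAdjBad cs := by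
  intro cs
  induction cs with
  | nil => simp [twoInARowRuns, twoInARowAdjBad]
  | cons c rest ih =>
    cases rest with
    | nil => simp [twoInARowRuns, twoInARowAdjBad, twoInARowBadRun]
    | cons d t =>
      obtain ⟨n, rs, hruns, hn⟩ := runs_head t d
      by_cases hcd : c = d
      · subst hcd
        have h2 : twoInARowRuns (c :: c :: t) = (c, n + 1) :: rs := by
          show (match twoInARowRuns (c :: t) with
            | [] => [(c, 1)]
            | (e, m) :: rs => if c = e then (c, m + 1) :: rs else (c, 1) :: (e, m) :: rs) = _
          rw [hruns]; simp
        rw [h2, List.any_cons]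
        rw [hruns, List.any_cons] at ih
        by_cases hb : c ≠ 'e' ∧ c ≠ 'o'
        · simp [twoInARowBadRun, twoInARowAdjBad, hb.1, hb.2, show 2 ≤ n + 1 by omega]
        · have hco : c = 'e' ∨ c = 'o' := by tauto
          rcases hco with h | h <;> subst h <;>
            simp [twoInARowBadRun, twoInARowAdjBad] at ih ⊢ <;> exact ih
      · have h2 : twoInARowRuns (c :: d :: t) = (c, 1) :: (d, n) :: rs := by
          show (match twoInARowRuns (d :: t) with
            | [] => [(c, 1)]
            | (e, m) :: rs => if c = e then (c, m + 1) :: rs else (c, 1) :: (e, m) :: rs) = _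
          rw [hruns]; simp [hcd]
        rw [h2, List.any_cons, List.any_cons]
        rw [hruns, List.any_cons] at ih
        have hdc : decide (d = c) = false := by
          simpa using fun h => hcd h.symm
        have hone : twoInARowBadRun (c, 1) = false := by
          simp [twoInARowBadRun]
        rw [hone]
        show ((d, n) :: rs).any twoInARowBadRun = twoInARowAdjBad (c :: d :: t)
        rw [List.any_cons, ih]
        show twoInARowAdjBad (d :: t) = twoInARowAdjBad (c :: d :: t)
        simp [twoInARowAdjBad, hdc]

theorem ab_eq : ∀ (pw : String) (ls : List String),
    two_in_a_row pw ls = two_in_a_row_alt pw ls := by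
  intro pw ls
  unfold two_in_a_row two_in_a_row_alt
  cases h : pw.toList with
  | nil => simp [twoInARowRuns]
  | cons c rest =>
    show twoInARowLoopA c 0 rest = !(twoInARowRuns (c :: rest)).any twoInARowBadRun
    rw [runs_eq_adjBad, loopA_eq_adjBad]

-- ===== VERDICT (by name: the statement is the Claim_ definition above) =====
theorem two_in_a_row_spec : Claim_equal_two_in_a_row := by
  intro pw ls _
  unfold Spec_two_in_a_row
  exact ab_eq pw ls
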